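-- pv_equiv track=rewrite | github.com/butter3415/py | day07.py | calculate_fee
-- ===== SOURCE A (Python) =====
-- def calculate_fee(ages):   # list로 받는다
--     total = 0
--     adults = 0
--     kids = 0
--
--     for age in ages:
--         if  19 <= age :    # adult
--             total = total + 10000
--             adults += 1
--         else:   # kids
--             total = total + 4000
--             kids += 1
--     return [len(ages), adults, kids, total]
-- ===== SOURCE B (Python) =====
-- def calculate_fee(ages):
--     s = sorted(ages)
--     lo, hi = 0, len(s)
--     while lo < hi:           # binary search: first index with s[mid] >= 19
--         mid = (lo + hi) // 2
--         if s[mid] < 19: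
--             lo = mid + 1
--         else:
--             hi = mid
--     kids = lo
--     adults = len(s) - lo
--     return [len(ages), adults, kids, 10000 * adults + 4000 * kids]
-- ===== Notes on version B (the rewrite author's own statement) =====
-- stated objective: alternative
-- what changed: B sorts the ages and locates the kid/adult boundary with a binary search (first index with age >= 19), deriving all four outputs arithmetically from that one index, instead of accumulating three counters through a branched linear loop.
import Mathlib
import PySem

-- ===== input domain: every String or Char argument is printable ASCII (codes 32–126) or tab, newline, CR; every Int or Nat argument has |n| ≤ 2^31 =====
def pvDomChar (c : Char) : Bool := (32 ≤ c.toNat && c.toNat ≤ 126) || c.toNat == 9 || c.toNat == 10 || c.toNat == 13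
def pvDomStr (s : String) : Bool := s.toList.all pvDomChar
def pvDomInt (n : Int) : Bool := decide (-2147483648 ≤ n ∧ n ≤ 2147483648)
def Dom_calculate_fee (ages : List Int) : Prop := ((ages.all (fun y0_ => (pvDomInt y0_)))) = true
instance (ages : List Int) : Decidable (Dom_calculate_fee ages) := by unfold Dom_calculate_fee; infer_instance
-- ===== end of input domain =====

-- B sorts the ages and binary-searches the kid/adult boundary, deriving all four outputs
-- from that one index, instead of accumulating three counters in a branched loop (objective: alternative).

-- ===== PORT A =====
-- port of A: branched loop accumulating (total, adults, kids)
def calculate_fee (ages : List Int) : List Int :=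
  let st := ages.foldl (fun (s : Int × Int × Int) age =>
    if 19 ≤ age then (s.1 + 10000, s.2.1 + 1, s.2.2)
    else (s.1 + 4000, s.2.1, s.2.2 + 1)) (0, 0, 0)
  [(ages.length : Int), st.2.1, st.2.2, st.1]

-- ===== PORT B =====
-- B's while-loop: lo, hi are Python ints that stay in [0, len s], so Nat lo/hi with Nat
-- division for (lo+hi)//2 is exact, and s[mid] (0 ≤ mid < len s throughout) is s.getD mid 0.
-- structural recursion on fuel = hi - lo (each step shrinks the interval, so hi - lo steps
-- always suffice; the fuel is only a totality device, the computation is the Python loop's)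
def pvBsearchGo (s : List Int) : Nat → Nat → Nat → Nat
  | 0, lo, _ => lo
  | fuel + 1, lo, hi =>
    if lo < hi then
      let mid := (lo + hi) / 2
      if s.getD mid 0 < 19 then pvBsearchGo s fuel (mid + 1) hi else pvBsearchGo s fuel lo mid
    else lo

def pvBsearch (s : List Int) (lo hi : Nat) : Nat := pvBsearchGo s (hi - lo) lo hi

-- port of B: sort, binary search for the first index with age ≥ 19, derive the outputs
def calculate_fee_alt (ages : List Int) : List Int :=
  let s := PySem.List.sorted ages (fun x => x) false
  let lo := pvBsearch s 0 s.length
  let kids : Int := (lo : Int)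
  let adults : Int := (s.length : Int) - (lo : Int)
  [(ages.length : Int), adults, kids, 10000 * adults + 4000 * kids]

-- ===== PRECONDITION & SPEC =====
def Spec_calculate_fee (ages : List Int) (out : List Int) : Prop := out = calculate_fee_alt ages
instance (ages : List Int) (out : List Int) : Decidable (Spec_calculate_fee ages out) := by unfold Spec_calculate_fee; infer_instance

-- ===== CLAIM (what is proved, stated in full; the proofs are below) =====
def Claim_equal_calculate_fee : Prop := ∀ (ages : List Int), Dom_calculate_fee ages → Spec_calculate_fee ages (calculate_fee ages)

-- ===== LEMMAS AND PROOFS =====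

-- A's fold computes the two counts and the fee total in one pass
lemma fee_fold_inv (ages : List Int) (t a k : Int) :
    ages.foldl (fun (s : Int × Int × Int) age =>
      if 19 ≤ age then (s.1 + 10000, s.2.1 + 1, s.2.2)
      else (s.1 + 4000, s.2.1, s.2.2 + 1)) (t, a, k)
    = (t + 10000 * (ages.countP (fun age => decide (19 ≤ age)) : Int)
         + 4000 * (ages.countP (fun age => decide (age < 19)) : Int),
       a + (ages.countP (fun age => decide (19 ≤ age)) : Int),
       k + (ages.countP (fun age => decide (age < 19)) : Int)) := by
  induction ages generalizing t a k with
  | nil => simp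
  | cons x xs ih =>
    by_cases h : 19 ≤ x
    · simp only [List.foldl_cons, if_pos h, ih, List.countP_cons]
      simp [h, not_lt.mpr h]
      exact ⟨by ring, by ring⟩
    · simp only [List.foldl_cons, if_neg h, ih, List.countP_cons]
      simp [h, not_le.mp h]
      exact ⟨by ring, by ring⟩

-- a list whose first r elements satisfy p and whose remaining elements do not has countP p = r
lemma countP_eq_of_split (s : List Int) (p : Int → Bool) (r : Nat) (hr : r ≤ s.length)
    (h1 : ∀ i, i < r → p (s.getD i 0) = true)
    (h2 : ∀ i, r ≤ i → i < s.length → p (s.getD i 0) = false) :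
    s.countP p = r := by
  induction s generalizing r with
  | nil =>
    simp only [List.length_nil, Nat.le_zero] at hr
    simp [hr]
  | cons a s ih =>
    cases r with
    | zero =>
      rw [List.countP_cons]
      have ha : p a = false := h2 0 (Nat.zero_le _) (by simp)
      have hs : s.countP p = 0 :=
        ih 0 (Nat.zero_le _) (fun i h => absurd h (Nat.not_lt_zero i))
          (fun i _ hi => h2 (i + 1) (Nat.zero_le _) (by simpa using Nat.succ_lt_succ hi))
      simp [ha, hs]
    | succ r' =>
      rw [List.countP_cons]
      have ha : p a = true := h1 0 (Nat.succ_pos _)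
      have hs : s.countP p = r' :=
        ih r' (by simpa using hr)
          (fun i h => h1 (i + 1) (Nat.succ_lt_succ h))
          (fun i h hi => h2 (i + 1) (Nat.succ_le_succ h) (by simpa using Nat.succ_lt_succ hi))
      simp [ha, hs]

-- the binary search returns the number of elements < 19 of a sorted list
lemma pvBsearch_eq_countP_aux (s : List Int) (hs : s.Pairwise (· ≤ ·)) :
    ∀ (n lo hi : Nat), hi - lo ≤ n → lo ≤ hi → hi ≤ s.length →
    (∀ i, i < lo → s.getD i 0 < 19) →
    (∀ i, hi ≤ i → i < s.length → 19 ≤ s.getD i 0) →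
    pvBsearchGo s n lo hi = s.countP (fun a => decide (a < 19)) := by
  have hmono : ∀ i j, i ≤ j → j < s.length → s.getD i 0 ≤ s.getD j 0 := by
    intro i j hij hj
    rcases eq_or_lt_of_le hij with rfl | hlt
    · exact le_refl _
    · rw [List.getD_eq_getElem s 0 (by omega), List.getD_eq_getElem s 0 hj]
      exact List.pairwise_iff_getElem.mp hs i j (by omega) hj hlt
  intro n
  induction n with
  | zero =>
    intro lo hi hn hle hhi hlo hhiP
    have : lo = hi := by omega
    subst this
    rw [pvBsearchGo]
    exact (countP_eq_of_split s _ lo hhi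
      (fun i h => decide_eq_true (hlo i h))
      (fun i h1 h2 => decide_eq_false (not_lt.mpr (hhiP i h1 h2)))).symm
  | succ n ih =>
    intro lo hi hn hle hhi hlo hhiP
    rw [pvBsearchGo]
    by_cases hlt : lo < hi
    · rw [if_pos hlt]
      have hmid1 : lo ≤ (lo + hi) / 2 := by omega
      have hmid2 : (lo + hi) / 2 < hi := by omega
      by_cases hm : s.getD ((lo + hi) / 2) 0 < 19
      · rw [if_pos hm]
        exact ih ((lo + hi) / 2 + 1) hi (by omega) (by omega) hhi
          (fun i hi' => lt_of_le_of_lt (hmono i ((lo + hi) / 2) (by omega) (by omega)) hm)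
          hhiP
      · rw [if_neg hm]
        exact ih lo ((lo + hi) / 2) (by omega) (by omega) (by omega) hlo
          (fun i h1 h2 => le_trans (not_lt.mp hm) (hmono ((lo + hi) / 2) i h1 h2))
    · rw [if_neg hlt]
      have : lo = hi := by omega
      subst this
      exact (countP_eq_of_split s _ lo hhi
        (fun i h => decide_eq_true (hlo i h))
        (fun i h1 h2 => decide_eq_false (not_lt.mpr (hhiP i h1 h2)))).symm

-- every age is either a kid (< 19) or an adult (19 ≤), so the two counts sum to the length
lemma countP_lt_add_countP_ge (ages : List Int) :
    ages.countP (fun a => decide (a < 19)) + ages.countP (fun a => decide (19 ≤ a))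
      = ages.length := by
  induction ages with
  | nil => simp
  | cons x xs ih =>
    simp only [List.countP_cons, List.length_cons]
    by_cases h : x < 19
    · simp [h, not_le.mpr h]
      omega
    · simp [h, not_lt.mp h]
      omega

-- ===== VERDICT (by name: the statement is the Claim_ definition above) =====
theorem calculate_fee_spec : Claim_equal_calculate_fee := by
  intro ages _
  unfold Spec_calculate_fee calculate_fee calculate_fee_alt
  have hperm : (PySem.List.sorted ages (fun x => x) false).Perm ages :=
    PySem.List.sorted_perm ages (fun x => x) false
  have hpw : (PySem.List.sorted ages (fun x => x) false).Pairwise (fun a b => a ≤ b) :=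
    PySem.List.sorted_pairwise ages (fun x => x)
  have hlen : (PySem.List.sorted ages (fun x => x) false).length = ages.length :=
    hperm.length_eq
  have hcount : pvBsearch (PySem.List.sorted ages (fun x => x) false) 0
      (PySem.List.sorted ages (fun x => x) false).length
      = ages.countP (fun a => decide (a < 19)) := by
    rw [pvBsearch, pvBsearch_eq_countP_aux _ hpw _ 0 _ (by omega) (Nat.zero_le _) (le_refl _)
      (fun i h => absurd h (Nat.not_lt_zero i)) (fun i h1 h2 => absurd h2 (by omega))]
    exact hperm.countP_eq _
  have hsum := countP_lt_add_countP_ge ages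
  simp only [fee_fold_inv, List.cons.injEq, and_true, true_and, hcount]
  simp only [hlen]
  omega
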